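-- pv_equiv track=rewrite | github.com/rjwalters/kicad-tools | src/kicad_tools/placement/priors.py | _is_power_or_ground_net
-- ===== SOURCE A (Python) =====
-- _POWER_NET_PREFIXES = (
--     "vcc",
--     "vdd",
--     "v3.3",
--     "v3v3",
--     "v5",
--     "v1.8",
--     "v1v8",
--     "v2.5",
--     "v12",
--     "+3v3",
--     "+5v",
--     "+12v",
--     "+3.3v",
--     "+1.8v",
--     "avcc",
--     "avdd",
--     "dvcc",
--     "dvdd",
--     "vin",
--     "vout",
--     "vbus",
--     "vsys",
--     "vbat",
-- )
--
-- _GROUND_NET_PREFIXES = (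
--     "gnd",
--     "agnd",
--     "dgnd",
--     "pgnd",
--     "vss",
--     "avss",
--     "dvss",
--     "ground",
-- )
--
-- def _is_power_or_ground_net(name: str) -> bool:
--     """Check whether a net name looks like a power or ground rail."""
--     lower = name.lower().strip()
--     for prefix in _POWER_NET_PREFIXES + _GROUND_NET_PREFIXES:
--         if lower == prefix or lower.startswith(prefix + "_") or lower.startswith(prefix + "/"):
--             return True
--     # Exact match patterns
--     if lower in {"gnd", "vcc", "vdd", "vss", "vee"}:
--         return True
--     return False
-- ===== SOURCE B (Python) =====
-- _POWER_NET_PREFIXES = (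
--     "vcc", "vdd", "v3.3", "v3v3", "v5", "v1.8", "v1v8", "v2.5", "v12",
--     "+3v3", "+5v", "+12v", "+3.3v", "+1.8v", "avcc", "avdd", "dvcc", "dvdd",
--     "vin", "vout", "vbus", "vsys", "vbat",
-- )
--
-- _GROUND_NET_PREFIXES = (
--     "gnd", "agnd", "dgnd", "pgnd", "vss", "avss", "dvss", "ground",
-- )
--
-- # All rail prefixes in one O(1)-lookup set (no prefix contains '_' or '/').
-- _PREFIX_SET = frozenset(_POWER_NET_PREFIXES + _GROUND_NET_PREFIXES)
--
--
-- def _is_power_or_ground_net(name: str) -> bool: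
--     """Check whether a net name looks like a power or ground rail."""
--     lower = name.lower().strip()
--     # leading segment before the first '_' or '/' separator
--     head = lower.partition("_")[0].partition("/")[0]
--     return head in _PREFIX_SET or lower == "vee"
-- ===== Notes on version B (the rewrite author's own statement) =====
-- stated objective: idiomatic
-- what changed: Replaces the scan over all 31 prefixes with three startswith tests each by extracting the leading segment before the first '_' or '/' once and doing a single set-membership lookup (plus one exact check for 'vee', the only name not covered by the prefix set).
import Mathlib
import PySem

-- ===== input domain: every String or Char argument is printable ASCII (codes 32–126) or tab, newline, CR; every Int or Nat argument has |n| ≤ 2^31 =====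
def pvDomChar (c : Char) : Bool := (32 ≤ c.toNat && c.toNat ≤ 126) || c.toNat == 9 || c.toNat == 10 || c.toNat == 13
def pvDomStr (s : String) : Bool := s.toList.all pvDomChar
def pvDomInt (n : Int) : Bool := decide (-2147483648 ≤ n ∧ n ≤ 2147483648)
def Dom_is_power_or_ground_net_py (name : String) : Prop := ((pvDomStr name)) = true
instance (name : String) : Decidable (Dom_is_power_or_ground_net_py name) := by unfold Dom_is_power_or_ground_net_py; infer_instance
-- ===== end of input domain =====

-- B extracts the head segment before the first '_' or '/' once and does a single
-- set lookup (plus one exact check for "vee") instead of scanning all 31 prefixes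
-- with three startswith tests each; objective: more idiomatic, one pass.


-- ===== PORT A =====
def pvPowerPrefixes : List String :=
  ["vcc", "vdd", "v3.3", "v3v3", "v5", "v1.8", "v1v8", "v2.5", "v12",
   "+3v3", "+5v", "+12v", "+3.3v", "+1.8v", "avcc", "avdd", "dvcc", "dvdd",
   "vin", "vout", "vbus", "vsys", "vbat"]

def pvGroundPrefixes : List String :=
  ["gnd", "agnd", "dgnd", "pgnd", "vss", "avss", "dvss", "ground"]

def is_power_or_ground_net_py (name : String) : Bool :=
  let lower := PySem.Str.strip (PySem.Str.lower name)
  -- the for-loop with early return: any prefix matching exactly or with '_'/'/' appended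
  if (pvPowerPrefixes ++ pvGroundPrefixes).any (fun prefix_ =>
       lower == prefix_ || PySem.Str.startswith lower (prefix_ ++ "_")
         || PySem.Str.startswith lower (prefix_ ++ "/")) then
    true
  else if (PySem.Set.ofList ["gnd", "vcc", "vdd", "vss", "vee"]).contains lower then
    true
  else
    false

-- ===== PORT B =====
-- frozenset of all rail prefixes
def pvPrefixSet : List String := PySem.Set.ofList (pvPowerPrefixes ++ pvGroundPrefixes)

-- s.partition(c)[0] for a one-char separator: the part of s before the first c (exact)
def pvPartitionBefore (s : String) (c : Char) : String :=
  String.ofList (s.toList.takeWhile (fun d => d ≠ c))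

def is_power_or_ground_net_py_alt (name : String) : Bool :=
  let lower := PySem.Str.strip (PySem.Str.lower name)
  let head := pvPartitionBefore (pvPartitionBefore lower '_') '/'
  pvPrefixSet.contains head || lower == "vee"

-- ===== PRECONDITION & SPEC =====
def Spec_is_power_or_ground_net_py (name : String) (out : Bool) : Prop := out = is_power_or_ground_net_py_alt name
instance (name : String) (out : Bool) : Decidable (Spec_is_power_or_ground_net_py name out) := by unfold Spec_is_power_or_ground_net_py; infer_instance

-- ===== CLAIM (what is proved, stated in full; the proofs are below) =====
def Claim_equal_is_power_or_ground_net_py : Prop := ∀ (name : String), Dom_is_power_or_ground_net_py name → Spec_is_power_or_ground_net_py name (is_power_or_ground_net_py name)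

-- ===== LEMMAS AND PROOFS =====

-- chars allowed inside a head segment (neither separator)
def pvSep (c : Char) : Bool := decide (c ≠ '_') && decide (c ≠ '/')

theorem pvTakeWhile_comp (l : List Char) :
    ((l.takeWhile (fun d => d ≠ '_')).takeWhile (fun d => d ≠ '/')) = l.takeWhile pvSep := by
  induction l with
  | nil => rfl
  | cons c t ih =>
    by_cases h1 : c = '_'
    · subst h1; simp [pvSep]
    · by_cases h2 : c = '/'
      · subst h2; simp [pvSep]
      · simp [pvSep, h1, h2]
        simp only [ne_eq, decide_not] at ih
        exact ih

-- core: the head segment equals p iff the string is p or p followed by a separator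
theorem pvHead_eq_iff (p : List Char) (hp : ∀ c ∈ p, pvSep c = true) (l : List Char) :
    l.takeWhile pvSep = p ↔ (l = p ∨ (p ++ ['_']) <+: l ∨ (p ++ ['/']) <+: l) := by
  induction p generalizing l with
  | nil =>
    cases l with
    | nil => simp
    | cons c t =>
      constructor
      · intro h
        by_cases hc : pvSep c = true
        · simp [hc] at h
        · have hcc : c = '_' ∨ c = '/' := by
            by_contra hno
            push_neg at hno
            simp [pvSep, hno.1, hno.2] at hc
          rcases hcc with h1 | h1
          · right; left; exact ⟨t, by rw [h1]; rfl⟩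
          · right; right; exact ⟨t, by rw [h1]; rfl⟩
      · rintro (h | ⟨r, hr⟩ | ⟨r, hr⟩)
        · simp at h
        · obtain ⟨h1, h2⟩ : '_' = c ∧ r = t := by simpa using hr
          simp [pvSep, ← h1]
        · obtain ⟨h1, h2⟩ : '/' = c ∧ r = t := by simpa using hr
          simp [pvSep, ← h1]
  | cons a p' ih =>
    have ha : pvSep a = true := hp a (List.mem_cons_self ..)
    have hp' : ∀ c ∈ p', pvSep c = true := fun c hc => hp c (List.mem_cons_of_mem _ hc)
    cases l with
    | nil => simp
    | cons c t =>
      by_cases hca : c = a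
      · subst hca
        simp only [List.takeWhile_cons, ha, if_true, List.cons_append,
          List.cons_prefix_cons, List.cons.injEq, true_and]
        exact ih hp' t
      · constructor
        · intro h
          by_cases hc : pvSep c = true
          · rw [List.takeWhile_cons, if_pos hc] at h
            injection h with h1 _
            exact absurd h1 hca
          · rw [List.takeWhile_cons, if_neg hc] at h
            simp at h
        · rintro (h | ⟨r, hr⟩ | ⟨r, hr⟩)
          · injection h with h1 _
            exact absurd h1 hca
          · rw [List.cons_append] at hr
            injection hr with h1 _
            exact absurd h1.symm hca
          · rw [List.cons_append] at hr
            injection hr with h1 _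
            exact absurd h1.symm hca

-- per-prefix: A's three-way test equals B's head comparison
theorem pvCond_eq_head (p s : String) (hp : ∀ c ∈ p.toList, pvSep c = true) :
    (s == p || PySem.Str.startswith s (p ++ "_") || PySem.Str.startswith s (p ++ "/"))
      = ((pvPartitionBefore (pvPartitionBefore s '_') '/') == p) := by
  have key := pvHead_eq_iff p.toList hp s.toList
  have hhead : (pvPartitionBefore (pvPartitionBefore s '_') '/').toList
      = s.toList.takeWhile pvSep := by
    simp only [pvPartitionBefore, String.toList_ofList]
    exact pvTakeWhile_comp s.toList
  have e1 : (s = p) ↔ (s.toList = p.toList) := String.toList_inj.symm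
  have e2 : (pvPartitionBefore (pvPartitionBefore s '_') '/' = p)
      ↔ (s.toList.takeWhile pvSep = p.toList) := by
    rw [← hhead]
    exact String.toList_inj.symm
  rw [Bool.eq_iff_iff]
  simp only [Bool.or_eq_true, beq_iff_eq, PySem.Str.startswith_eq, PySem.Chars.startswith_iff]
  rw [e2, key, e1]
  have h1 : (p ++ "_").toList = p.toList ++ ['_'] := by simp
  have h2 : (p ++ "/").toList = p.toList ++ ['/'] := by simp
  rw [h1, h2]
  exact or_assoc

-- the whole body, with the shared `lower` abstracted as s
theorem pvBody_eq (s : String) :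
    (if ((pvPowerPrefixes ++ pvGroundPrefixes).any fun prefix_ =>
          s == prefix_ || PySem.Str.startswith s (prefix_ ++ "_")
            || PySem.Str.startswith s (prefix_ ++ "/")) = true then true
     else if (PySem.Set.ofList ["gnd", "vcc", "vdd", "vss", "vee"]).contains s = true then true
     else false)
    = (pvPrefixSet.contains (pvPartitionBefore (pvPartitionBefore s '_') '/') || s == "vee") := by
  have hall : ∀ p ∈ pvPowerPrefixes ++ pvGroundPrefixes, ∀ c ∈ p.toList, pvSep c = true := by
    simp [pvPowerPrefixes, pvGroundPrefixes, pvSep]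
  have hpt : ∀ p ∈ pvPowerPrefixes ++ pvGroundPrefixes,
      (s == p || PySem.Str.startswith s (p ++ "_") || PySem.Str.startswith s (p ++ "/"))
        = ((pvPartitionBefore (pvPartitionBefore s '_') '/') == p) :=
    fun p hm => pvCond_eq_head p s (hall p hm)
  have hset : pvPrefixSet = pvPowerPrefixes ++ pvGroundPrefixes := by decide
  have hany : ((pvPowerPrefixes ++ pvGroundPrefixes).any fun prefix_ =>
        s == prefix_ || PySem.Str.startswith s (prefix_ ++ "_")
          || PySem.Str.startswith s (prefix_ ++ "/"))
      = pvPrefixSet.contains (pvPartitionBefore (pvPartitionBefore s '_') '/') := by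
    rw [hset, List.contains_eq_any_beq, Bool.eq_iff_iff]
    simp only [List.any_eq_true]
    constructor
    · rintro ⟨p, hm, hc⟩; exact ⟨p, hm, (hpt p hm) ▸ hc⟩
    · rintro ⟨p, hm, hc⟩; exact ⟨p, hm, (hpt p hm).symm ▸ hc⟩
  rw [hany]
  by_cases hc : pvPrefixSet.contains (pvPartitionBefore (pvPartitionBefore s '_') '/') = true
  · rw [if_pos hc, hc, Bool.true_or]
  · rw [if_neg hc]
    rw [Bool.not_eq_true] at hc
    rw [hc, Bool.false_or]
    by_cases hv : s = "vee"
    · subst hv; simp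
    · have hofl : (PySem.Set.ofList ["gnd", "vcc", "vdd", "vss", "vee"] : List String)
          = ["gnd", "vcc", "vdd", "vss", "vee"] := by decide
      have h5 : (PySem.Set.ofList ["gnd", "vcc", "vdd", "vss", "vee"]).contains s = false := by
        by_contra hmem
        rw [Bool.not_eq_false, hofl] at hmem
        have hs : s = "gnd" ∨ s = "vcc" ∨ s = "vdd" ∨ s = "vss" ∨ s = "vee" := by
          simpa using hmem
        rcases hs with h | h | h | h | h
        · subst h; rw [hset] at hc
          revert hc
          simp [pvPartitionBefore, pvPowerPrefixes, pvGroundPrefixes]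
        · subst h; rw [hset] at hc
          revert hc
          simp [pvPartitionBefore, pvPowerPrefixes, pvGroundPrefixes]
        · subst h; rw [hset] at hc
          revert hc
          simp [pvPartitionBefore, pvPowerPrefixes, pvGroundPrefixes]
        · subst h; rw [hset] at hc
          revert hc
          simp [pvPartitionBefore, pvPowerPrefixes, pvGroundPrefixes]
        · exact hv h
      rw [h5]
      simp [hv]

-- ===== VERDICT (by name: the statement is the Claim_ definition above) =====
theorem is_power_or_ground_net_py_spec : Claim_equal_is_power_or_ground_net_py := by
  intro name _
  show is_power_or_ground_net_py name = is_power_or_ground_net_py_alt name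
  exact pvBody_eq (PySem.Str.strip (PySem.Str.lower name))
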